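-- pv_equiv track=rewrite | github.com/AdamZhouSE/pythonHomework | Code/CodeRecords/2832/60691/293705.py | function
-- ===== SOURCE A (Python) =====
-- def function(l):
--     time = 0
--     position = 0
--     while position < len(l):
--         if position+1 >= max(l[0:position+1]):
--             time += 1
--             position += 1
--         else:
--             position += 1
--     return time
-- ===== SOURCE B (Python) =====
-- def function(l):
--     # One pass: maintain the running maximum instead of recomputing max(l[0:position+1]) each step.
--     time = 0
--     m = None
--     for i, x in enumerate(l):
--         if m is None or x > m:
--             m = x
--         if i + 1 >= m:
--             time += 1
--     return time
-- ===== Notes on version B (the rewrite author's own statement) =====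
-- stated objective: faster
-- what changed: B replaces A's per-position recomputation of max over the growing prefix slice with a single pass that maintains the running maximum.
import Mathlib
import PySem

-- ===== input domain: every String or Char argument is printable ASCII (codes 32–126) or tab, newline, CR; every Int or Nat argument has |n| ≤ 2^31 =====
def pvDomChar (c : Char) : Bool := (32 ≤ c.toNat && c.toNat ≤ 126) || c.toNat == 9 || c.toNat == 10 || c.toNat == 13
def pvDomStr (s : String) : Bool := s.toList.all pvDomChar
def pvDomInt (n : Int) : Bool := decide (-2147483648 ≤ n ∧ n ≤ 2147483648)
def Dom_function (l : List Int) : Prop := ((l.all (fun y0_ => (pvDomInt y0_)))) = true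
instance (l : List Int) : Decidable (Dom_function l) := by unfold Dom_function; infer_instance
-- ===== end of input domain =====

-- B replaces A's per-position recomputation of max over the growing prefix slice with a
-- single pass maintaining the running maximum.

-- ===== PORT A =====
-- while position < len(l): if position+1 >= max(l[0:position+1]): time += 1; position += 1
-- Both branches advance position by 1, so the while loop is a fold over range(len(l));
-- the 'none' arm of the match is Python's max-of-empty ValueError, unreachable since the
-- slice l[0:position+1] is nonempty for every position < len(l).
def function (l : List Int) : Int :=
  (PySem.List.pyRange 0 (PySem.List.len l) 1).foldl
    (fun time position =>
      match PySem.List.max? (PySem.List.slice l (some 0) (some (position + 1))) (fun y => y) with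
      | some m => if position + 1 ≥ m then time + 1 else time
      | none => time) 0

-- ===== PORT B =====
-- for i, x in enumerate(l): if m is None or x > m: m = x; if i+1 >= m: time += 1
def functionAltGo : List Int → Int → Option Int → Int → Int
  | [], _, _, time => time
  | x :: xs, i, m, time =>
    let m' : Int := match m with
      | none => x
      | some mm => if x > mm then x else mm
    functionAltGo xs (i + 1) (some m') (if i + 1 ≥ m' then time + 1 else time)

def function_alt (l : List Int) : Int := functionAltGo l 0 none 0

-- ===== PRECONDITION & SPEC =====
def Spec_function (l : List Int) (out : Int) : Prop := out = function_alt l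
instance (l : List Int) (out : Int) : Decidable (Spec_function l out) := by unfold Spec_function; infer_instance

-- ===== CLAIM (what is proved, stated in full; the proofs are below) =====
def Claim_equal_function : Prop := ∀ (l : List Int), Dom_function l → Spec_function l (function l)

-- ===== LEMMAS AND PROOFS =====

-- A's value on l ++ [x]: the first l.length iterations see the same prefix slices as on l,
-- and the final iteration tests position l.length against max(l ++ [x]).
theorem function_append (l : List Int) (x : Int) :
    function (l ++ [x])
      = (match PySem.List.max? (l ++ [x]) (fun y => y) with
         | some m => if (l.length : Int) + 1 ≥ m then function l + 1 else function l
         | none => function l) := by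
  unfold function
  rw [PySem.List.len_eq, PySem.List.len_eq]
  simp only [List.length_append, List.length_cons, List.length_nil]
  push_cast
  rw [PySem.List.pyRange_one_succ_right (by positivity)]
  rw [List.foldl_append]
  have hcong : ∀ (acc : Int), ∀ p ∈ PySem.List.pyRange 0 (l.length : Int),
      (fun time position =>
        match PySem.List.max? (PySem.List.slice (l ++ [x]) (some 0) (some (position + 1))) (fun y => y) with
        | some m => if position + 1 ≥ m then time + 1 else time
        | none => time) acc p
      = (fun time position =>
        match PySem.List.max? (PySem.List.slice l (some 0) (some (position + 1))) (fun y => y) with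
        | some m => if position + 1 ≥ m then time + 1 else time
        | none => time) acc p := by
    intro acc p hp
    rw [PySem.List.mem_pyRange_one] at hp
    have hsl : PySem.List.slice (l ++ [x]) (some 0) (some (p + 1))
        = PySem.List.slice l (some 0) (some (p + 1)) := by
      rw [PySem.List.slice_zero_start, PySem.List.slice_zero_start,
          PySem.List.slice_to (l ++ [x]) (by omega : (0:Int) ≤ p + 1),
          PySem.List.slice_to l (by omega : (0:Int) ≤ p + 1),
          List.take_append_of_le_length (by omega)]
    beta_reduce
    rw [hsl]
  rw [PySem.List.foldl_congr_mem _ _ _ _ hcong]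
  have hwhole : PySem.List.slice (l ++ [x]) (some 0) (some ((l.length : Int) + 1)) = l ++ [x] := by
    rw [PySem.List.slice_zero_start,
        PySem.List.slice_to (l ++ [x]) (by positivity : (0:Int) ≤ (l.length : Int) + 1)]
    apply List.take_of_length_le
    simp
  simp only [List.foldl_cons, List.foldl_nil, hwhole]

-- running-max state reached by B's loop after consuming xs, started from m
def runm (xs : List Int) (m : Option Int) : Option Int :=
  xs.foldl (fun m x => some (match m with
    | none => x
    | some mm => if x > mm then x else mm)) m

theorem functionAltGo_append (xs ys : List Int) (i : Int) (m : Option Int) (t : Int) :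
    functionAltGo (xs ++ ys) i m t
      = functionAltGo ys (i + xs.length) (runm xs m) (functionAltGo xs i m t) := by
  induction xs generalizing i m t with
  | nil => simp [functionAltGo, runm]
  | cons x xs ih =>
    simp only [List.cons_append, functionAltGo, runm, List.foldl_cons]
    rw [ih]
    simp [runm]
    ring_nf

theorem runm_some (xs : List Int) (a : Int) : runm xs (some a) = some (xs.foldl max a) := by
  induction xs generalizing a with
  | nil => simp [runm]
  | cons x xs ih =>
    simp only [runm, List.foldl_cons] at *
    have hmax : (if x > a then x else a) = max a x := by omega
    rw [hmax, ih]

theorem main_eq (l : List Int) : function l = function_alt l := by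
  induction l using List.reverseRecOn with
  | nil => rfl
  | append_singleton l x ih =>
    rw [function_append]
    unfold function_alt
    rw [functionAltGo_append]
    cases l with
    | nil =>
      simp only [List.nil_append, PySem.List.max?_id_cons, List.foldl_nil,
        functionAltGo, runm, List.length_nil, List.foldl_nil]
      norm_num [function]
    | cons h t =>
      rw [show (h :: t) ++ [x] = h :: (t ++ [x]) by simp,
          PySem.List.max?_id_cons, List.foldl_append]
      have hr : runm (h :: t) none = some (t.foldl max h) := by
        simp only [runm, List.foldl_cons]
        exact runm_some t h
      rw [hr]
      simp only [functionAltGo, List.foldl_cons, List.foldl_nil]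
      have halt : functionAltGo t (0 + 1) (some h) (if (0:Int) + 1 ≥ h then 0 + 1 else 0)
          = function_alt (h :: t) := by
        simp [function_alt, functionAltGo]
      rw [halt, ih]
      have hm : (if x > t.foldl max h then x else t.foldl max h) = max (t.foldl max h) x := by
        omega
      rw [hm, show (0:Int) + ((h :: t).length : Int) + 1 = ((h :: t).length : Int) + 1 from by ring]
      rfl

-- ===== VERDICT (by name: the statement is the Claim_ definition above) =====
theorem function_spec : Claim_equal_function := by
  intro l _
  unfold Spec_function
  exact main_eq l
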